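-- pv_equiv track=rewrite | github.com/raywted75/Meta-Coding-Puzzles | Level 1/Stack Stabilization (Chapter 1).py | getMinimumDeflatedDiscCount
-- ===== SOURCE A (Python) =====
-- from typing import List
--
-- def getMinimumDeflatedDiscCount(N: int, R: List[int]) -> int:
--   # Write your code here
--   stack = list()
--
--   for r in R:
--     stack.append(r)
--
--     i = len(stack) - 1
--     while i > 0 and stack[i - 1] >= stack[i]:
--         stack[i - 1] = stack[i] - 1
--         if stack[i - 1] == 0:
--           return -1
--         i -= 1
--
--   return sum(x != y for x, y in zip(stack, R))
-- ===== SOURCE B (Python) =====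
-- from typing import List
--
-- def getMinimumDeflatedDiscCount(N: int, R: List[int]) -> int:
--   # Single left-to-right pass over shifted values t = r - k with one monotone
--   # stack of (index, t): each pop is exactly one disc that must be deflated, and
--   # the stack top locates the nearest earlier index with t' <= t, which decides
--   # whether the chain of deflations triggered by disc k would hit radius 0.
--   stack = []  # (index, r - index), t-values nondecreasing bottom to top
--   pops = 0
--   for k, r in enumerate(R):
--     t = r - k
--     while stack and stack[-1][1] > t:
--       stack.pop()
--       pops += 1
--     prev = stack[-1][0] if stack else -1
--     if 1 <= r <= k and prev < k - r:
--       return -1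
--     stack.append((k, t))
--   return pops
-- ===== Notes on version B (the rewrite author's own statement) =====
-- stated objective: faster
-- what changed: A literally simulates deflation with a stack of radii and re-walks it after every append (quadratic worst case); B makes one left-to-right pass over the shifted values t=r-k with a monotone stack of indices: each pop is exactly one deflated disc, and the stack top (nearest earlier index with t'<=t) decides the radius-0 / return -1 case.
import Mathlib
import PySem

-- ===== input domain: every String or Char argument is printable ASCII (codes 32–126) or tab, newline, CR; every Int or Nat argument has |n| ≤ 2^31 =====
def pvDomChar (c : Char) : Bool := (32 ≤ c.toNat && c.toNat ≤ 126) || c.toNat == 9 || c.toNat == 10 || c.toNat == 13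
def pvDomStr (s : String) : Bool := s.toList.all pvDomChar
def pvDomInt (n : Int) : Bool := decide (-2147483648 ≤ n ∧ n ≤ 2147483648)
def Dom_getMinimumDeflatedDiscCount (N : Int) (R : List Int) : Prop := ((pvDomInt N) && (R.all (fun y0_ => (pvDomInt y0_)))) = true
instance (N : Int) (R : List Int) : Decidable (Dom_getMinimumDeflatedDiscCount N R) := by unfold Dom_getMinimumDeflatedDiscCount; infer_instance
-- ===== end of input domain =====

-- B replaces A's quadratic stack re-walking by one linear monotone-stack pass over r-k; equal return value on all inputs.

-- ===== PORT A =====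
-- inner while loop: `i = len(stack)-1; while i > 0 and stack[i-1] >= stack[i]: stack[i-1] = stack[i]-1; if stack[i-1]==0: return -1; i -= 1`
-- (indices i, i-1 are always in range, so stack[·] is List.getD; `return -1` is `none`)
def pvInner (c : List Int) : Nat → Option (List Int)
  | 0 => some c
  | j + 1 =>
    if c.getD j 0 ≥ c.getD (j + 1) 0 then
      if c.getD (j + 1) 0 - 1 = 0 then none
      else pvInner (c.set j (c.getD (j + 1) 0 - 1)) j
    else some c

-- `for r in R: stack.append(r); <inner loop>` with early `return -1` as none
def pvALoop : List Int → List Int → Option (List Int)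
  | s, [] => some s
  | s, r :: rest =>
    match pvInner (s ++ [r]) ((s ++ [r]).length - 1) with
    | none => none
    | some s' => pvALoop s' rest

def getMinimumDeflatedDiscCount (N : Int) (R : List Int) : Int :=
  match pvALoop [] R with
  | none => -1
  | some stack => (stack.zip R).foldl (fun acc xy => acc + (if xy.1 ≠ xy.2 then (1 : Int) else 0)) 0

-- ===== PORT B =====
-- `while stack and stack[-1][1] > t: stack.pop(); pops += 1` (Python's list top = head here)
def pvPop : List (Nat × Int) → Int → Int → List (Nat × Int) × Int
  | [], pops, _ => ([], pops)
  | (j, tj) :: st, pops, t => if tj > t then pvPop st (pops + 1) t else ((j, tj) :: st, pops)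

-- `prev = stack[-1][0] if stack else -1` (top of stack = head here)
def pvPrev : List (Nat × Int) → Int
  | [] => -1
  | (j, _) :: _ => (j : Int)

-- `for k, r in enumerate(R): ...` with early `return -1` as none
def pvBLoop : List (Nat × Int) → Int → Nat → List Int → Option Int
  | _, pops, _, [] => some pops
  | st, pops, k, r :: rest =>
    let t : Int := r - (k : Int)
    let pr := pvPop st pops t
    let prev : Int := pvPrev pr.1
    if 1 ≤ r ∧ r ≤ (k : Int) ∧ prev < (k : Int) - r then none
    else pvBLoop ((k, t) :: pr.1) pr.2 (k + 1) rest

def getMinimumDeflatedDiscCount_alt (N : Int) (R : List Int) : Int :=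
  match pvBLoop [] 0 0 R with
  | none => -1
  | some pops => pops

-- ===== PRECONDITION & SPEC =====
def Spec_getMinimumDeflatedDiscCount (N : Int) (R : List Int) (out : Int) : Prop := out = getMinimumDeflatedDiscCount_alt N R
instance (N : Int) (R : List Int) (out : Int) : Decidable (Spec_getMinimumDeflatedDiscCount N R out) := by unfold Spec_getMinimumDeflatedDiscCount; infer_instance

-- ===== CLAIM (what is proved, stated in full; the proofs are below) =====
def Claim_equal_getMinimumDeflatedDiscCount : Prop := ∀ (N : Int) (R : List Int), Dom_getMinimumDeflatedDiscCount N R → Spec_getMinimumDeflatedDiscCount N R (getMinimumDeflatedDiscCount N R)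

-- ===== LEMMAS AND PROOFS =====

-- shifted value of position j in list s: s[j] - j
def dS (s : List Int) (j : Nat) : Int := s.getD j 0 - (j : Int)

-- where A's inner loop stops, scanning down from i with threshold t
def stopIdx (c : List Int) (t : Int) : Nat → Nat
  | 0 => 0
  | j + 1 => if dS c j > t then stopIdx c t j else j + 1

-- the coupling invariant between A's stack s and B's (stack st, pops) after processing prefix P
def PVInv (P s : List Int) (st : List (Nat × Int)) (pops : Int) : Prop :=
  s.length = P.length ∧
  (∀ j m, j ≤ m → m < P.length → dS s j ≤ dS P m) ∧
  (∀ j, j < P.length → ∃ m, j ≤ m ∧ m < P.length ∧ dS s j = dS P m ∧ s.getD m 0 = P.getD m 0) ∧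
  st = ((List.range P.length).filter (fun j => s.getD j 0 == P.getD j 0)).reverse.map
        (fun j => (j, dS P j)) ∧
  pops = (((List.range P.length).filter (fun j => !(s.getD j 0 == P.getD j 0))).length : Int)

lemma pvBLoop_cons (st st' : List (Nat × Int)) (pops pops' : Int) (k : Nat) (r : Int)
    (rest : List Int) (h : pvPop st pops (r - (k : Int)) = (st', pops')) :
    pvBLoop st pops k (r :: rest) =
      if 1 ≤ r ∧ r ≤ (k : Int) ∧ pvPrev st' < (k : Int) - r then none
      else pvBLoop ((k, r - (k : Int)) :: st') pops' (k + 1) rest := by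
  simp only [pvBLoop, h]

lemma stopIdx_le (c : List Int) (t : Int) : ∀ i, stopIdx c t i ≤ i := by
  intro i; induction i with
  | zero => simp [stopIdx]
  | succ j ih => simp only [stopIdx]; split <;> omega

lemma stopIdx_gt (c : List Int) (t : Int) : ∀ i m, stopIdx c t i ≤ m → m < i → dS c m > t := by
  intro i; induction i with
  | zero => omega
  | succ j ih =>
    intro m h1 h2
    by_cases hd : dS c j > t
    · simp only [stopIdx, if_pos hd] at h1
      rcases Nat.lt_or_ge m j with h | h
      · exact ih m h1 h
      · have : m = j := by omega
        subst this; exact hd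
    · simp only [stopIdx, if_neg hd] at h1; omega

lemma stopIdx_last (c : List Int) (t : Int) :
    ∀ i, 0 < stopIdx c t i → dS c (stopIdx c t i - 1) ≤ t := by
  intro i; induction i with
  | zero => simp [stopIdx]
  | succ j ih =>
    intro h
    by_cases hd : dS c j > t
    · simp only [stopIdx, if_pos hd] at h ⊢; exact ih h
    · simp only [stopIdx, if_neg hd] at h ⊢; simpa using le_of_not_gt hd

lemma stopIdx_congr (c₁ c₂ : List Int) (t : Int) :
    ∀ i, (∀ m, m < i → c₁.getD m 0 = c₂.getD m 0) → stopIdx c₁ t i = stopIdx c₂ t i := by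
  intro i; induction i with
  | zero => intro _; rfl
  | succ j ih =>
    intro h
    have hj : dS c₁ j = dS c₂ j := by unfold dS; rw [h j (by omega)]
    simp only [stopIdx, hj]
    split
    · exact ih fun m hm => h m (by omega)
    · rfl

lemma inner_spec (t : Int) : ∀ (i : Nat) (c : List Int), i < c.length →
    (∀ m, i ≤ m → m < c.length → c.getD m 0 = t + (m : Int)) →
    if t + (stopIdx c t i : Int) ≤ 0 ∧ 0 < t + (i : Int) then pvInner c i = none
    else ∃ c', pvInner c i = some c' ∧ c'.length = c.length ∧
      ∀ m, m < c.length → c'.getD m 0 = if stopIdx c t i ≤ m ∧ m < i then t + (m : Int) else c.getD m 0 := by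
  intro i
  induction i with
  | zero =>
    intro c hlen _
    rw [if_neg (by simp [stopIdx])]
    exact ⟨c, rfl, rfl, fun m _ => by simp⟩
  | succ j ih =>
    intro c hlen hfin
    have hcj1 : c.getD (j + 1) 0 = t + ((j : Int) + 1) := by
      have := hfin (j + 1) le_rfl hlen; push_cast at this ⊢; exact this
    have hstople := stopIdx_le c t j
    by_cases hd : dS c j > t
    · -- the while condition holds: assign position j
      have hge : c.getD j 0 ≥ c.getD (j + 1) 0 := by
        unfold dS at hd; rw [hcj1]; omega
      have hv : c.getD (j + 1) 0 - 1 = t + (j : Int) := by rw [hcj1]; ring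
      have hstop : stopIdx c t (j + 1) = stopIdx c t j := by
        simp only [stopIdx, if_pos hd]
      by_cases hz : t + (j : Int) = 0
      · -- radius hits 0: return -1
        have hcond : t + (stopIdx c t (j + 1) : Int) ≤ 0 ∧ 0 < t + ((j + 1 : Nat) : Int) := by
          rw [hstop]
          constructor
          · have : (stopIdx c t j : Int) ≤ (j : Int) := by exact_mod_cast hstople
            omega
          · push_cast; omega
        rw [if_pos hcond]
        simp only [pvInner, if_pos hge]
        rw [hv, if_pos hz]
      · -- recurse at j on the updated list
        set c₂ := c.set j (t + (j : Int)) with hc₂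
        have hjlen : j < c.length := by omega
        have hlen₂ : c₂.length = c.length := by simp [hc₂]
        have hset_self : c₂.getD j 0 = t + (j : Int) := by
          simp [hc₂, List.getD_eq_getElem?_getD, List.getElem?_set, hjlen]
        have hset_other : ∀ m, m ≠ j → c₂.getD m 0 = c.getD m 0 := by
          intro m hm
          simp [hc₂, List.getD_eq_getElem?_getD, List.getElem?_set, Ne.symm hm]
        have hfin₂ : ∀ m, j ≤ m → m < c₂.length → c₂.getD m 0 = t + (m : Int) := by
          intro m h1 h2
          rcases Nat.eq_or_lt_of_le h1 with h | h
          · subst h; exact hset_self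
          · rw [hset_other m (by omega)]; exact hfin m (by omega) (by omega)
        have hstop₂ : stopIdx c₂ t j = stopIdx c t j :=
          stopIdx_congr c₂ c t j (fun m hm => hset_other m (by omega))
        have hrec : pvInner c (j + 1) = pvInner c₂ j := by
          simp only [pvInner, if_pos hge]
          rw [hv, if_neg hz]
        have ihj := ih c₂ (by omega) hfin₂
        rw [hstop₂] at ihj
        by_cases hcond : t + (stopIdx c t (j + 1) : Int) ≤ 0 ∧ 0 < t + ((j + 1 : Nat) : Int)
        · rw [if_pos hcond]
          have hcondj : t + (stopIdx c t j : Int) ≤ 0 ∧ 0 < t + (j : Int) := by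
            rw [hstop] at hcond
            have h2 := hcond.2; push_cast at h2
            exact ⟨hcond.1, by omega⟩
          rw [if_pos hcondj] at ihj
          rw [hrec]; exact ihj
        · rw [if_neg hcond]
          have hcondj : ¬ (t + (stopIdx c t j : Int) ≤ 0 ∧ 0 < t + (j : Int)) := by
            intro h
            exact hcond (by rw [hstop]; exact ⟨h.1, by push_cast; omega⟩)
          rw [if_neg hcondj] at ihj
          obtain ⟨c', he, hlen', hval⟩ := ihj
          refine ⟨c', by rw [hrec]; exact he, by rw [hlen', hlen₂], ?_⟩
          intro m hm
          have hval' := hval m (by omega)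
          rw [hstop]
          by_cases hmj : m = j
          · subst hmj
            rw [if_pos ⟨by omega, by omega⟩]
            rw [hval', if_neg (by omega), hset_self]
          · rcases Nat.lt_or_ge m j with hlt | hge'
            · rw [hval', hset_other m hmj]
              by_cases hc : stopIdx c t j ≤ m
              · rw [if_pos ⟨hc, by omega⟩, if_pos ⟨hc, by omega⟩]
              · rw [if_neg (by omega), if_neg (by omega)]
            · have hmgt : m > j := by omega
              rw [hval', if_neg (by omega), if_neg (by omega), hset_other m hmj]
    · -- while condition fails: loop ends, list unchanged
      have hge : ¬ (c.getD j 0 ≥ c.getD (j + 1) 0) := by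
        unfold dS at hd; rw [hcj1]; omega
      have hstop : stopIdx c t (j + 1) = j + 1 := by
        simp only [stopIdx, if_neg hd]
      rw [if_neg (by rw [hstop]; push_cast; omega)]
      refine ⟨c, by simp only [pvInner, if_neg hge], rfl, ?_⟩
      intro m hm
      rw [hstop, if_neg (by omega)]

lemma pvPop_spec (g : Nat → Int) (t : Int) (stop : Nat) :
    ∀ (M : List Nat) (pops : Int), M.Pairwise (· > ·) → (∀ j ∈ M, (g j > t ↔ stop ≤ j)) →
    pvPop (M.map (fun j => (j, g j))) pops t
      = ((M.filter (fun j => j < stop)).map (fun j => (j, g j)),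
         pops + ((M.filter (fun j => stop ≤ j)).length : Int)) := by
  intro M
  induction M with
  | nil => intro pops _ _; simp [pvPop]
  | cons j M ih =>
    intro pops hpw hiff
    have hj := hiff j (by simp)
    rcases List.pairwise_cons.mp hpw with ⟨hgt, hpw'⟩
    by_cases hs : stop ≤ j
    · have hgj : g j > t := hj.mpr hs
      have hnlt : ¬ (j < stop) := by omega
      rw [List.map_cons]
      simp only [pvPop, if_pos hgj]
      rw [ih (pops + 1) hpw' (fun m hm => hiff m (by simp [hm]))]
      have e1 : (j :: M).filter (fun m => decide (m < stop)) = M.filter (fun m => decide (m < stop)) := by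
        simp [List.filter_cons, hnlt]
      have e2 : (j :: M).filter (fun m => decide (stop ≤ m)) = j :: M.filter (fun m => decide (stop ≤ m)) := by
        simp [List.filter_cons, hs]
      rw [e1, e2]
      simp only [List.length_cons, Prod.mk.injEq]
      exact ⟨by trivial, by push_cast; ring⟩
    · have hng : ¬ (g j > t) := fun h => hs (hj.mp h)
      rw [List.map_cons]
      simp only [pvPop, if_neg hng]
      have hall : ∀ m ∈ M, m < stop := fun m hm => by have := hgt m hm; omega
      have h1 : M.filter (fun m => decide (m < stop)) = M :=
        List.filter_eq_self.mpr (fun m hm => by simpa using hall m hm)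
      have h2 : M.filter (fun m => decide (stop ≤ m)) = [] :=
        List.filter_eq_nil_iff.mpr (fun m hm => by have := hall m hm; simp; omega)
      have hjlt : j < stop := by omega
      simp [List.filter_cons, hjlt, hs, h1, h2]

lemma countNe_eq : ∀ (P s : List Int) (acc : Int), s.length = P.length →
    (s.zip P).foldl (fun acc xy => acc + (if xy.1 ≠ xy.2 then (1 : Int) else 0)) acc
      = acc + (((List.range P.length).filter (fun j => !(s.getD j 0 == P.getD j 0))).length : Int) := by
  intro P
  induction P with
  | nil => intro s acc h; simp [List.zip]
  | cons y P ih =>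
    intro s acc h
    match s with
    | [] => simp at h
    | x :: s =>
      simp only [List.length_cons, Nat.succ_inj] at h
      rw [List.zip_cons_cons, List.foldl_cons, ih s _ h, List.length_cons,
          List.range_succ_eq_map, List.filter_cons, List.filter_map]
      simp only [Function.comp_def, List.getD_cons_succ, List.getD_cons_zero, List.length_map]
      by_cases hxy : x = y
      · simp [hxy]
      · simp only [if_pos hxy, List.length_cons]
        simp [hxy]
        push_cast
        ring

lemma count_split {α : Type} (p q : α → Bool) : ∀ (l : List α),
    ((l.filter (fun x => !(p x && q x))).length : Int)
      = ((l.filter (fun x => !p x)).length : Int) + ((l.filter (fun x => p x && !q x)).length : Int) := by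
  intro l; induction l with
  | nil => simp
  | cons x l ih =>
    by_cases hp : p x <;> by_cases hq : q x <;>
      simp [List.filter_cons, hp, hq, -Bool.not_and] <;> push_cast <;> omega

lemma main_lemma : ∀ (rest P s : List Int) (st : List (Nat × Int)) (pops : Int),
    PVInv P s st pops →
    (match pvALoop s rest with
     | none => (-1 : Int)
     | some s' => (s'.zip (P ++ rest)).foldl (fun acc xy => acc + (if xy.1 ≠ xy.2 then (1 : Int) else 0)) 0)
    = (match pvBLoop st pops P.length rest with
       | none => (-1 : Int)
       | some p => p) := by
  intro rest
  induction rest with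
  | nil =>
    intro P s st pops hinv
    obtain ⟨hlen, h2a, h2b, hst, hpops⟩ := hinv
    simp only [pvALoop, pvBLoop]
    rw [List.append_nil, countNe_eq P s 0 hlen, hpops]
    ring
  | cons r rest ih =>
    intro P s st pops hinv
    obtain ⟨hlen, h2a, h2b, hst, hpops⟩ := hinv
    set k := P.length with hk
    set t : Int := r - (k : Int) with ht
    set c : List Int := s ++ [r] with hc
    have hclen : c.length = k + 1 := by simp [hc, hlen]
    have hcm : ∀ m, m < k → c.getD m 0 = s.getD m 0 := by
      intro m hm; rw [hc, List.getD_append _ _ _ _ (by omega)]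
    have hck : c.getD k 0 = r := by
      rw [hc, ← hlen, List.getD_eq_getElem?_getD, List.getElem?_append_right (le_refl _)]
      simp
    have hkc : k < c.length := by omega
    have hfin : ∀ m, k ≤ m → m < c.length → c.getD m 0 = t + (m : Int) := by
      intro m h1 h2
      have hmk : m = k := by omega
      subst hmk; rw [hck, ht]; ring
    have hinner := inner_spec t k c hkc hfin
    set stop := stopIdx c t k with hstopdef
    have hstople : stop ≤ k := stopIdx_le c t k
    have hdc : ∀ m, m < k → dS c m = dS s m := by
      intro m hm; unfold dS; rw [hcm m hm]
    have hgt : ∀ m, stop ≤ m → m < k → dS s m > t := by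
      intro m h1 h2; rw [← hdc m h2]; exact stopIdx_gt c t k m h1 h2
    have hmono : ∀ j m, j ≤ m → m < k → dS s j ≤ dS s m := by
      intro j m hjm hm
      obtain ⟨m', hm'1, hm'2, hm'3, hm'4⟩ := h2b m hm
      have := h2a j m' (le_trans hjm hm'1) hm'2
      rw [← hm'3] at this
      exact this
    have hle : ∀ m, m < stop → dS s m ≤ t := by
      intro m hm
      have h1 : dS c (stop - 1) ≤ t := stopIdx_last c t k (by omega)
      have h2 : dS s (stop - 1) ≤ t := by rw [← hdc _ (by omega)]; exact h1
      exact le_trans (hmono m (stop - 1) (by omega) (by omega)) h2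
    set L : List Nat := (List.range k).filter (fun j => s.getD j 0 == P.getD j 0) with hL
    set M : List Nat := L.reverse with hM
    have hdesc : M.Pairwise (· > ·) := by
      rw [hM, List.pairwise_reverse]
      exact List.Pairwise.filter _ (List.pairwise_lt_range)
    have hmemM : ∀ j ∈ M, j < k ∧ s.getD j 0 = P.getD j 0 := by
      intro j hj
      rw [hM, List.mem_reverse, hL, List.mem_filter, List.mem_range] at hj
      exact ⟨hj.1, by simpa using hj.2⟩
    have hiff : ∀ j ∈ M, (dS P j > t ↔ stop ≤ j) := by
      intro j hj
      obtain ⟨hjk, hjeq⟩ := hmemM j hj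
      have hdps : dS P j = dS s j := by unfold dS; rw [hjeq]
      rw [hdps]
      constructor
      · intro h; by_contra hn; push_neg at hn
        have := hle j (by omega); omega
      · intro h; exact hgt j h hjk
    set st₁ : List (Nat × Int) := (M.filter (fun j => decide (j < stop))).map (fun j => (j, dS P j)) with hst₁
    set pops₁ : Int := pops + ((M.filter (fun j => decide (stop ≤ j))).length : Int) with hpops₁
    have hpop' : pvPop st pops t = (st₁, pops₁) := by
      rw [hst]; exact pvPop_spec (fun j => dS P j) t stop M pops hdesc hiff
    have hAstep : pvALoop s (r :: rest) =
        match pvInner c k with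
        | none => none
        | some s' => pvALoop s' rest := by
      simp only [pvALoop, ← hc]
      rw [(by omega : c.length - 1 = k)]
    by_cases hcond : t + (stop : Int) ≤ 0 ∧ 0 < t + (k : Int)
    · -- A returns -1: B's guard fires too
      rw [if_pos hcond] at hinner
      rw [hAstep, hinner]
      rw [pvBLoop_cons st st₁ pops pops₁ k r rest (by rw [← ht]; exact hpop')]
      have hguard : 1 ≤ r ∧ r ≤ (k : Int) ∧ pvPrev st₁ < (k : Int) - r := by
        refine ⟨by omega, by omega, ?_⟩
        rw [hst₁]
        rcases hfe : M.filter (fun j => decide (j < stop)) with _ | ⟨j₀, tl⟩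
        · simp [pvPrev]; omega
        · simp only [List.map_cons, pvPrev]
          have hj₀ : j₀ ∈ M.filter (fun j => decide (j < stop)) := by
            rw [hfe]; exact List.mem_cons_self
          have hlt : j₀ < stop := by simpa using (List.mem_filter.mp hj₀).2
          omega
      rw [if_pos hguard]
    · -- A continues: B's guard is false and both recurse
      rw [if_neg hcond] at hinner
      obtain ⟨c', he, hlen', hval⟩ := hinner
      rw [hAstep, he]
      have hguard : ¬ (1 ≤ r ∧ r ≤ (k : Int) ∧ pvPrev st₁ < (k : Int) - r) := by
        rintro ⟨h1, h2, h3⟩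
        have h0k : 0 < t + (k : Int) := by omega
        have hstoppos : 0 < t + (stop : Int) := by
          rcases not_and_or.mp hcond with h | h
          · omega
          · exact absurd h0k h
        obtain ⟨jstar, hjstarIk⟩ : ∃ x : Nat, (x : Int) = (k : Int) - r :=
          ⟨((k : Int) - r).toNat, by omega⟩
        have hjstark : jstar < k := by omega
        have hjstarstop : jstar < stop := by omega
        have hlej := hle jstar hjstarstop
        obtain ⟨m, hm1, hm2, hm3, hm4⟩ := h2b jstar hjstark
        have hmM : m ∈ M := by
          rw [hM, List.mem_reverse, hL, List.mem_filter, List.mem_range]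
          exact ⟨hm2, by simpa using hm4⟩
        have hmstop : m < stop := by
          by_contra hn
          have hn' : stop ≤ m := by omega
          have := (hiff m hmM).mpr hn'
          have hd1 : dS P m = dS s jstar := hm3.symm
          rw [hd1] at this
          omega
        have hmfil : m ∈ M.filter (fun j => decide (j < stop)) := by
          rw [List.mem_filter]; exact ⟨hmM, by simpa using hmstop⟩
        rcases hfe : M.filter (fun j => decide (j < stop)) with _ | ⟨j₀, tl⟩
        · rw [hfe] at hmfil; simp at hmfil
        · have hfilpw : (M.filter (fun j => decide (j < stop))).Pairwise (· > ·) :=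
            List.Pairwise.filter _ hdesc
          rw [hfe] at hfilpw hmfil
          have hmj₀ : m ≤ j₀ := by
            rcases List.mem_cons.mp hmfil with h | h
            · omega
            · exact le_of_lt ((List.pairwise_cons.mp hfilpw).1 m h)
          rw [hst₁, hfe] at h3
          simp only [List.map_cons, pvPrev] at h3
          have : (jstar : Int) ≤ (j₀ : Int) := by exact_mod_cast le_trans hm1 hmj₀
          omega
      have hBstep : pvBLoop st pops k (r :: rest) = pvBLoop ((k, t) :: st₁) pops₁ (k + 1) rest := by
        rw [pvBLoop_cons st st₁ pops pops₁ k r rest (by rw [← ht]; exact hpop'), if_neg hguard, ← ht]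
      rw [hBstep]
      -- new invariant for P' = P ++ [r]
      set P' : List Int := P ++ [r] with hP'
      have hP'len : P'.length = k + 1 := by simp [hP', hk]
      have hPm : ∀ m, m < k → P'.getD m 0 = P.getD m 0 := by
        intro m hm
        have hmP : m < P.length := by omega
        rw [hP', List.getD_append _ _ _ _ hmP]
      have hPk : P'.getD k 0 = r := by
        rw [hP', List.getD_eq_getElem?_getD, hk, List.getElem?_append_right (le_refl _)]
        simp
      have hc'm : ∀ m, m < k →
          c'.getD m 0 = if stop ≤ m ∧ m < k then t + (m : Int) else s.getD m 0 := by
        intro m hm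
        rw [hval m (by omega)]
        split
        · rfl
        · exact hcm m hm
      have hc'k : c'.getD k 0 = r := by
        rw [hval k (by omega), if_neg (by omega), hck]
      have hdc'm : ∀ m, m < k → dS c' m = if stop ≤ m then t else dS s m := by
        intro m hm
        unfold dS; rw [hc'm m hm]
        by_cases hsm : stop ≤ m
        · rw [if_pos ⟨hsm, hm⟩, if_pos hsm]; ring
        · rw [if_neg (by omega), if_neg hsm]
      have hdc'k : dS c' k = t := by unfold dS; rw [hc'k, ht]
      have hdPm : ∀ m, m < k → dS P' m = dS P m := by
        intro m hm; unfold dS; rw [hPm m hm]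
      have hdPk : dS P' k = t := by unfold dS; rw [hPk, ht]
      have hPgtt : ∀ m, stop ≤ m → m < k → dS P m > t := by
        intro m h1 h2
        have := h2a m m le_rfl h2
        have := hgt m h1 h2
        omega
      have hinv' : PVInv P' c' ((k, t) :: st₁) pops₁ := by
        refine ⟨by rw [hlen', hclen, hP'len], ?_, ?_, ?_, ?_⟩
        · -- 2a
          intro j m hjm hm
          rw [hP'len] at hm
          rcases Nat.lt_or_ge m k with hmk | hmk
          · rw [hdPm m hmk]
            have hjk : j < k := by omega
            rw [hdc'm j hjk]
            by_cases hsj : stop ≤ j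
            · rw [if_pos hsj]
              exact le_of_lt (hPgtt m (by omega) hmk)
            · rw [if_neg hsj]
              exact h2a j m hjm hmk
          · have hmk' : m = k := by omega
            subst hmk'
            rw [hdPk]
            rcases Nat.lt_or_ge j k with hjk | hjk
            · rw [hdc'm j hjk]
              by_cases hsj : stop ≤ j
              · rw [if_pos hsj]
              · rw [if_neg hsj]; exact hle j (by omega)
            · have : j = k := by omega
              subst this; rw [hdc'k]
        · -- 2b
          intro j hj
          rw [hP'len] at hj
          by_cases hsj : stop ≤ j
          · refine ⟨k, by omega, by omega, ?_, by rw [hc'k, hPk]⟩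
            rcases Nat.lt_or_ge j k with hjk | hjk
            · rw [hdc'm j hjk, if_pos hsj, hdPk]
            · have : j = k := by omega
              subst this; rw [hdc'k, hdPk]
          · have hjk : j < k := by omega
            obtain ⟨m, hm1, hm2, hm3, hm4⟩ := h2b j hjk
            have hmstop : m < stop := by
              by_contra hn
              have hn' : stop ≤ m := by omega
              have h1 := hgt m hn' hm2
              have h2 : dS s m = dS P m := by unfold dS; rw [hm4]
              have h3 := hle j (by omega)
              rw [h2, ← hm3] at h1
              omega
            refine ⟨m, hm1, by omega, ?_, ?_⟩
            · rw [hdc'm j hjk, if_neg hsj, hdPm m hm2, hm3]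
            · rw [hc'm m hm2, if_neg (by omega), hPm m hm2, hm4]
        · -- stack equation
          rw [hP'len, List.range_succ, List.filter_append, List.reverse_append]
          have hbeqk : (c'.getD k 0 == P'.getD k 0) = true := by rw [hc'k, hPk]; simp
          have hfk : List.filter (fun j => c'.getD j 0 == P'.getD j 0) [k] = [k] := by
            simp only [List.filter_cons, List.filter_nil]
            rw [hbeqk]
            simp
          rw [hfk]
          have hfcong : List.filter (fun j => c'.getD j 0 == P'.getD j 0) (List.range k)
              = List.filter (fun j => decide (j < stop) && (s.getD j 0 == P.getD j 0)) (List.range k) := by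
            apply List.filter_congr
            intro j hj
            rw [List.mem_range] at hj
            rw [hc'm j hj, hPm j hj]
            by_cases hsj : stop ≤ j
            · rw [if_pos ⟨hsj, hj⟩]
              have hne : (t + (j : Int) == P.getD j 0) = false := by
                have := hPgtt j hsj hj
                unfold dS at this
                exact beq_eq_false_iff_ne.mpr (by omega)
              have hd : decide (j < stop) = false := by simp; omega
              rw [hne, hd, Bool.false_and]
            · rw [if_neg (by omega)]
              have hd : decide (j < stop) = true := decide_eq_true (by omega)
              rw [hd, Bool.true_and]
          rw [hfcong, ← List.filter_filter, ← hL, ← List.filter_reverse, ← hM]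
          simp only [List.reverse_cons, List.reverse_nil, List.nil_append, List.map_cons,
            List.cons_append]
          congr 1
          · rw [hdPk]
          · rw [hst₁]
            apply List.map_congr_left
            intro j hj
            have hjM : j ∈ M := (List.mem_filter.mp hj).1
            have hjk : j < k := (hmemM j hjM).1
            rw [hdPm j hjk]
        · -- pops equation
          rw [hP'len, List.range_succ, List.filter_append]
          have hbeqk : (c'.getD k 0 == P'.getD k 0) = true := by rw [hc'k, hPk]; simp
          have hfk : List.filter (fun j => !(c'.getD j 0 == P'.getD j 0)) [k] = [] := by
            simp only [List.filter_cons, List.filter_nil]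
            rw [hbeqk]
            simp
          rw [hfk, List.append_nil]
          have hfcong : List.filter (fun j => !(c'.getD j 0 == P'.getD j 0)) (List.range k)
              = List.filter (fun j => !((s.getD j 0 == P.getD j 0) && decide (j < stop))) (List.range k) := by
            apply List.filter_congr
            intro j hj
            rw [List.mem_range] at hj
            rw [hc'm j hj, hPm j hj]
            by_cases hsj : stop ≤ j
            · rw [if_pos ⟨hsj, hj⟩]
              have hne : (t + (j : Int) == P.getD j 0) = false := by
                have := hPgtt j hsj hj
                unfold dS at this
                exact beq_eq_false_iff_ne.mpr (by omega)
              have hd : decide (j < stop) = false := by simp; omega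
              rw [hne, hd, Bool.and_false]
            · rw [if_neg (by omega)]
              have hd : decide (j < stop) = true := decide_eq_true (by omega)
              rw [hd, Bool.and_true]
          rw [hfcong, count_split (fun j => s.getD j 0 == P.getD j 0) (fun j => decide (j < stop))]
          rw [hpops₁, hpops]
          congr 1
          have hswap : List.filter (fun j => (s.getD j 0 == P.getD j 0) && !decide (j < stop)) (List.range k)
              = List.filter (fun j => !decide (j < stop) && (s.getD j 0 == P.getD j 0)) (List.range k) :=
            List.filter_congr (fun a _ => by rw [Bool.and_comm])
          rw [hswap, ← List.filter_filter, ← hL, hM, List.filter_reverse, List.length_reverse]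
          have hfc : List.filter (fun j => !decide (j < stop)) L = List.filter (fun j => decide (stop ≤ j)) L :=
            List.filter_congr (fun a _ => by simp [← decide_not])
          rw [hfc]
      have hfinal := ih P' c' ((k, t) :: st₁) pops₁ hinv'
      rw [hP'len] at hfinal
      rw [← hfinal]
      rw [hP', List.append_assoc, List.singleton_append]

-- ===== VERDICT (by name: the statement is the Claim_ definition above) =====
theorem getMinimumDeflatedDiscCount_spec : Claim_equal_getMinimumDeflatedDiscCount := by
  intro N R _
  unfold Spec_getMinimumDeflatedDiscCount getMinimumDeflatedDiscCount getMinimumDeflatedDiscCount_alt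
  have h := main_lemma R [] [] [] 0 (by
    exact ⟨rfl, by intro j m _ h; simp at h, by intro j h; simp at h, rfl, rfl⟩)
  simpa using h
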